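-- pv_equiv track=rewrite | github.com/pypi-data/pypi-mirror-336 | packages/nastranio/nastranio-0.21.4.tar.gz/nastranio-0.21.4/nastranio/utils.py | transform_dict_of_list
-- ===== SOURCE A (Python) =====
-- def transform_dict_of_list(data):
--     """transform a dict of list into a list of dict:
--
--     >>> data = {'MIDi': [1002, 1003, 1009],
--     ... 'SOUTi': ['NO', 'YES', 'YES'],
--     ... 'Ti': [0.018, 0.339, 0.018],
--     ... 'THETAi': [0.0, 0.0, 5.0]}
--     >>> expected = [{'MIDi': 1002, 'SOUTi': 'NO', 'Ti': 0.018, 'THETAi': 0.0},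
--     ...             {'MIDi': 1003, 'SOUTi': 'YES', 'Ti': 0.339, 'THETAi': 0.0},
--     ...             {'MIDi': 1009, 'SOUTi': 'YES', 'Ti': 0.018, 'THETAi': 5.0}]
--     >>> transform_dict_of_list(data) == expected
--     True
--     """
--     ret = []
--     nb_items = len(data[next(iter(data.keys()))])
--     for item_no in range(nb_items):
--         _d = {}
--         for fieldname, seq in data.items():
--             _d[fieldname] = list(seq)[item_no]
--         ret.append(_d)
--     return ret
-- ===== SOURCE B (Python) =====
-- def transform_dict_of_list(data):
--     """Transpose via zip(*columns): materialise all rows at once with zip,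
--     then wrap each row as dict(zip(keys, row)) -- no per-cell indexing."""
--     keys = list(data)
--     columns = [list(v) for v in data.values()]
--     return [dict(zip(keys, row)) for row in zip(*columns)]
-- ===== Notes on version B (the rewrite author's own statement) =====
-- stated objective: alternative
-- what changed: B transposes the table wholesale with zip(*columns) and builds each row dict from dict(zip(keys, row)), instead of A's nested index loop that rebuilds list(seq) and indexes every cell.
import Mathlib
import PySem

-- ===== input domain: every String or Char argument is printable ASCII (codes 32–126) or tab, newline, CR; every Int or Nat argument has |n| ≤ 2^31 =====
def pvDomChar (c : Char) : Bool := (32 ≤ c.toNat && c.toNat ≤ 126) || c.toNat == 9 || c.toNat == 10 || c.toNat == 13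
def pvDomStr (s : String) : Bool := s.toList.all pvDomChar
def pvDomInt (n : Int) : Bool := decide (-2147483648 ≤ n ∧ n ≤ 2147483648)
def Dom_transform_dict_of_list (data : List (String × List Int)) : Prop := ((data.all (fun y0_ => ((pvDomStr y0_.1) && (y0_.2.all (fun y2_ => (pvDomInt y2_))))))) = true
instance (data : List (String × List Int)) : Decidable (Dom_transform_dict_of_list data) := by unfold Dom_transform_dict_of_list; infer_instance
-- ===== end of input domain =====

-- B transposes the whole table with zip(*columns) and wraps each row with dict(zip(keys, row)),
-- instead of A's nested index loop; A raises on the inputs Pre_ excludes.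

-- ===== PORT A =====
-- row-major: for each item_no, build the row dict by walking all fields
def transform_dict_of_list (data : List (String × List Int)) : List (List (String × Int)) :=
  match data with
  | [] => []  -- unreachable under Pre_ (Python raises StopIteration)
  | (_, v0) :: _ =>
    let nb := v0.length  -- len(data[next(iter(data.keys()))]): first key's value
    (List.range nb).foldl
      (fun (ret : List (List (String × Int))) (item_no : Nat) =>
        ret ++ [(data.foldl
          (fun d p => d.insert p.1 (PySem.List.pyGetD p.2 (item_no : Int) 0))
          (PySem.Dict.empty : PySem.Dict String Int)).items])
      []

-- ===== PORT B =====
-- zip(*cols): emit the heads of all columns while every column is non-empty, then recurse on the tails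
def pyZipStar (cols : List (List Int)) : List (List Int) :=
  if h : cols ≠ [] ∧ cols.all (fun c => !c.isEmpty) then
    cols.map (fun c => c.headI) :: pyZipStar (cols.map List.tail)
  else []
termination_by cols.headI.length
decreasing_by
  obtain ⟨hne, hall⟩ := h
  match cols with
  | c :: cs =>
    simp only [List.map_cons, List.headI]
    have hc : c ≠ [] := by
      have := List.all_eq_true.mp hall c List.mem_cons_self
      simpa [List.isEmpty_iff] using this
    have : 0 < c.length := List.length_pos_iff.mpr hc
    simp [List.length_tail]; omega

-- keys = list(data); columns = [list(v) for v in data.values()]; [dict(zip(keys, row)) for row in zip(*columns)]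
def transform_dict_of_list_alt (data : List (String × List Int)) : List (List (String × Int)) :=
  let keys := data.map Prod.fst
  let columns := data.map (fun p => p.2)
  (pyZipStar columns).map (fun row =>
    ((keys.zip row).foldl
      (fun (d : PySem.Dict String Int) kv => d.insert kv.1 kv.2)
      (PySem.Dict.empty : PySem.Dict String Int)).items)

-- ===== PRECONDITION & SPEC =====
-- Pre_ = exactly the inputs on which the Python A returns: a non-empty dict whose first value is no longer than any other value
-- (empty dict → StopIteration; a value shorter than the first → IndexError).
def Pre_transform_dict_of_list (data : List (String × List Int)) : Prop :=
  data ≠ [] ∧ ∀ p ∈ data, (data.headI).2.length ≤ p.2.length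
instance (data : List (String × List Int)) : Decidable (Pre_transform_dict_of_list data) := by unfold Pre_transform_dict_of_list; infer_instance

def pvWitness_transform_dict_of_list : (List (String × List Int)) := [("a", [1, 2]), ("b", [3, 4, 5])]

def Spec_transform_dict_of_list (data : List (String × List Int)) (out : List (List (String × Int))) : Prop := out = transform_dict_of_list_alt data
instance (data : List (String × List Int)) (out : List (List (String × Int))) : Decidable (Spec_transform_dict_of_list data out) := by unfold Spec_transform_dict_of_list; infer_instance

-- ===== CLAIM (what is proved, stated in full; the proofs are below) =====
def Claim_equal_transform_dict_of_list : Prop := ∀ (data : List (String × List Int)), Dom_transform_dict_of_list data → Pre_transform_dict_of_list data → Spec_transform_dict_of_list data (transform_dict_of_list data)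

-- ===== LEMMAS AND PROOFS =====

-- appending singletons in a foldl is a map
theorem pv_foldl_append_map {α β : Type} (f : α → β) :
    ∀ (l : List α) (acc : List β), l.foldl (fun r i => r ++ [f i]) acc = acc ++ l.map f := by
  intro l
  induction l with
  | nil => simp
  | cons x xs ih => intro acc; simp [List.foldl, ih]

theorem pv_tail_getD (c : List Int) (j : Nat) : c.tail.getD j 0 = c.getD (j + 1) 0 := by
  cases c <;> simp

-- characterisation of zip(*cols) when the first column (length n) is no longer than any other
theorem pvZip_char :
    ∀ (n : Nat) (cols : List (List Int)), cols ≠ [] → cols.headI.length = n →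
      (∀ c ∈ cols, n ≤ c.length) →
      pyZipStar cols = (List.range n).map (fun j => cols.map (fun c => c.getD j 0)) := by
  intro n
  induction n with
  | zero =>
    intro cols hne hhead _
    rw [pyZipStar]
    rw [dif_neg]
    · simp
    · rintro ⟨-, hall⟩
      match cols with
      | c :: cs =>
        have hc : c = [] := List.length_eq_zero_iff.mp hhead
        have := List.all_eq_true.mp hall c List.mem_cons_self
        simp [hc] at this
  | succ m ih =>
    intro cols hne hhead hlen
    have hall : cols.all (fun c => !c.isEmpty) = true := by
      apply List.all_eq_true.mpr
      intro c hc
      have := hlen c hc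
      simp [List.isEmpty_iff]
      exact List.length_pos_iff.mp (by omega)
    rw [pyZipStar, dif_pos ⟨hne, hall⟩]
    have htne : cols.map List.tail ≠ [] := by simpa using hne
    have hthead : (cols.map List.tail).headI.length = m := by
      match cols with
      | c :: cs => simp only [List.map_cons, List.headI] at hhead ⊢; simp [List.length_tail, hhead]
    have htlen : ∀ t ∈ cols.map List.tail, m ≤ t.length := by
      intro t ht
      obtain ⟨c, hc, rfl⟩ := List.mem_map.mp ht
      have := hlen c hc
      simp [List.length_tail]; omega
    rw [ih _ htne hthead htlen, List.range_succ_eq_map, List.map_cons, List.map_map]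
    congr 1
    · apply List.map_congr_left
      intro c hc
      have : c ≠ [] := by
        have := hlen c hc; exact List.length_pos_iff.mp (by omega)
      match c with
      | x :: xs => simp [List.headI]
    · apply List.map_congr_left
      intro j _
      simp only [Function.comp, List.map_map]
      apply List.map_congr_left
      intro c _
      exact pv_tail_getD c j

-- both sides build row j by folding inserts of (key, value[j]) over the fields in order
theorem pv_row_eq (data : List (String × List Int)) (j : Nat) :
    ((data.map Prod.fst).zip ((data.map (fun p => p.2)).map (fun c => c.getD j 0))).foldl
        (fun (d : PySem.Dict String Int) kv => d.insert kv.1 kv.2) PySem.Dict.empty =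
      data.foldl (fun d p => d.insert p.1 (PySem.List.pyGetD p.2 (j : Int) 0)) PySem.Dict.empty := by
  rw [List.map_map, List.zip_map', List.foldl_map]
  simp [PySem.List.pyGetD_natCast]

-- ===== VERDICT (by name: the statement is the Claim_ definition above) =====
theorem transform_dict_of_list_spec : Claim_equal_transform_dict_of_list := by
  intro data _ hpre
  obtain ⟨hne, hlen⟩ := hpre
  unfold Spec_transform_dict_of_list transform_dict_of_list transform_dict_of_list_alt
  match data, hne with
  | (k0, v0) :: rest, _ =>
    simp only
    rw [pvZip_char v0.length (((k0, v0) :: rest).map (fun p => p.2)) (by simp) (by simp [List.headI])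
        (by intro c hc
            obtain ⟨p, hp, rfl⟩ := List.mem_map.mp hc
            simpa [List.headI] using hlen p hp)]
    rw [List.map_map]
    refine (pv_foldl_append_map
        (fun j => (((k0, v0) :: rest).foldl
          (fun d p => d.insert p.1 (PySem.List.pyGetD p.2 (j : Int) 0))
          (PySem.Dict.empty : PySem.Dict String Int)).items)
        (List.range v0.length) []).trans ?_
    simp only [List.nil_append]
    apply List.map_congr_left
    intro j _
    simp only [Function.comp]
    rw [pv_row_eq ((k0, v0) :: rest) j]
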